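-- pv_equiv track=rewrite | github.com/viketss/python | guide4/3-caja-fuerte.py | obtenerClaves
-- ===== SOURCE A (Python) =====
-- def obtenerClaves(claveMaestra):
--     clave1 = '' # digitos en posiciones impares
--     clave2 = '' # digitos en posiciones pares
--
--     for pos, digito in enumerate(claveMaestra, start=1):
--         if pos % 2 == 1: #impares
--             clave1 += digito
--         else:
--             clave2 += digito
--
--     return clave1, clave2
-- ===== SOURCE B (Python) =====
-- def obtenerClaves(claveMaestra):
--     return claveMaestra[::2], claveMaestra[1::2]
-- ===== Notes on version B (the rewrite author's own statement) =====
-- stated objective: idiomatic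
-- what changed: Replaces the per-character loop with an explicit position counter and parity test by two extended slices (claveMaestra[::2] and claveMaestra[1::2]) that extract each half in one operation.
import Mathlib
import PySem

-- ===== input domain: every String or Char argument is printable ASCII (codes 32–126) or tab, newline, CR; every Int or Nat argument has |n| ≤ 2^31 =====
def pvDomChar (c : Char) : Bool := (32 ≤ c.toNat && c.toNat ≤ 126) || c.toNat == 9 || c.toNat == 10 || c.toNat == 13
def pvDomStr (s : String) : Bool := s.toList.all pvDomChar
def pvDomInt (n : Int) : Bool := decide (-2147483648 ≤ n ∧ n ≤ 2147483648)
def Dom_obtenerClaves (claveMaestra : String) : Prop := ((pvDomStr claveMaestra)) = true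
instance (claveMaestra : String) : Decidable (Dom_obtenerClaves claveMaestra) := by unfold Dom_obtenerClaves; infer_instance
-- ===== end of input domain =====

-- B replaces A's position counter + parity-test loop by two extended slices [::2] and [1::2] (idiomatic; a timing run measured B faster by a constant factor).

-- ===== PORT A =====
-- the enumerate(…, start=1) loop as structural recursion over the characters, carrying pos and the two accumulators
def obtenerClavesLoop : List Char → Int → List Char → List Char → List Char × List Char
  | [], _, clave1, clave2 => (clave1, clave2)
  | digito :: rest, pos, clave1, clave2 =>
      if PySem.Int.mod pos 2 = 1 then
        obtenerClavesLoop rest (pos + 1) (clave1 ++ [digito]) clave2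
      else
        obtenerClavesLoop rest (pos + 1) clave1 (clave2 ++ [digito])

def obtenerClaves (claveMaestra : String) : String × String :=
  let r := obtenerClavesLoop claveMaestra.toList 1 [] []
  (String.ofList r.1, String.ofList r.2)

-- ===== PORT B =====
-- claveMaestra[::2] and claveMaestra[1::2]; step 2 ≠ 0 so slice? always returns a value (getD "" is the totality guard)
def obtenerClaves_alt (claveMaestra : String) : String × String :=
  ((PySem.Str.slice? claveMaestra none none 2).getD "",
   (PySem.Str.slice? claveMaestra (some 1) none 2).getD "")

-- ===== PRECONDITION & SPEC =====
def Spec_obtenerClaves (claveMaestra : String) (out : String × String) : Prop := out = obtenerClaves_alt claveMaestra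
instance (claveMaestra : String) (out : String × String) : Decidable (Spec_obtenerClaves claveMaestra out) := by unfold Spec_obtenerClaves; infer_instance

-- ===== CLAIM (what is proved, stated in full; the proofs are below) =====
def Claim_equal_obtenerClaves : Prop := ∀ (claveMaestra : String), Dom_obtenerClaves claveMaestra → Spec_obtenerClaves claveMaestra (obtenerClaves claveMaestra)

-- ===== LEMMAS AND PROOFS =====

-- elements at even indices 0,2,4,… (Python's 1st, 3rd, … positions)
def pvEvens {α : Type} : List α → List α
  | [] => []
  | [a] => [a]
  | a :: _ :: t => a :: pvEvens t

theorem pvEvens_cons {α : Type} (a : α) (r : List α) :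
    pvEvens (a :: r) = a :: pvEvens r.tail := by
  cases r <;> simp [pvEvens]

theorem fm_evens {α : Type} : ∀ (xs : List α),
    (List.range ((xs.length + 1) / 2)).filterMap (fun k => xs[2 * k]?) = pvEvens xs := by
  intro xs
  induction xs using pvEvens.induct with
  | case1 => simp [pvEvens]
  | case2 a => simp [pvEvens]
  | case3 a b t ih =>
      have hl : ((a :: b :: t).length + 1) / 2 = (t.length + 1) / 2 + 1 := by
        simp only [List.length_cons]; omega
      rw [hl, List.range_succ_eq_map, List.filterMap_cons, List.filterMap_map]
      have he : (fun k => (a :: b :: t)[2 * k]?) ∘ Nat.succ = fun k => t[2 * k]? := by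
        funext k
        show (a :: b :: t)[2 * (k + 1)]? = t[2 * k]?
        rw [show 2 * (k + 1) = (2 * k + 1) + 1 by ring]
        simp
      rw [he, ih]
      norm_num [pvEvens]

theorem slice2_evens {α : Type} (xs : List α) :
    PySem.List.slice? xs none none 2 = some (pvEvens xs) := by
  rw [← fm_evens]
  simp only [PySem.List.slice?, PySem.List.sliceIndices]
  norm_num
  have hc : (if 0 < xs.length then (((xs.length : Int) + 2 - 1) / 2).toNat else 0) = (xs.length + 1) / 2 := by
    split_ifs <;> omega
  rw [hc]
  exact List.filterMap_congr (fun k _ => by congr 1)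

theorem slice2_odds {α : Type} (xs : List α) :
    PySem.List.slice? xs (some 1) none 2 = some (pvEvens xs.tail) := by
  rw [← fm_evens]
  cases xs with
  | nil => simp [PySem.List.slice?, PySem.List.sliceIndices]
  | cons a r =>
      simp only [PySem.List.slice?, PySem.List.sliceIndices]
      norm_num
      have hc : (if 0 < r.length then (((r.length : Int) + 2 - 1) / 2).toNat else 0) = (r.length + 1) / 2 := by
        split_ifs <;> omega
      rw [hc]
      refine List.filterMap_congr (fun k _ => ?_)
      rw [show ((1 : Int) + 2 * (k : Int)).toNat = 2 * k + 1 by omega]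
      simp

theorem loop_char (l : List Char) : ∀ (pos : Int) (c1 c2 : List Char),
    obtenerClavesLoop l pos c1 c2 =
      if PySem.Int.mod pos 2 = 1 then (c1 ++ pvEvens l, c2 ++ pvEvens l.tail)
      else (c1 ++ pvEvens l.tail, c2 ++ pvEvens l) := by
  induction l with
  | nil => intro pos c1 c2; simp [obtenerClavesLoop, pvEvens]
  | cons a r ih =>
      intro pos c1 c2
      have hm : PySem.Int.mod pos 2 = pos % 2 := by
        simp [PySem.Int.mod, Int.fmod_eq_emod]
      have hm1 : PySem.Int.mod (pos + 1) 2 = (pos + 1) % 2 := by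
        simp [PySem.Int.mod, Int.fmod_eq_emod]
      by_cases h : PySem.Int.mod pos 2 = 1
      · have h1 : ¬ PySem.Int.mod (pos + 1) 2 = 1 := by rw [hm1]; rw [hm] at h; omega
        simp only [obtenerClavesLoop, h, ih, h1]
        simp [pvEvens_cons, pvEvens]
      · have h1 : PySem.Int.mod (pos + 1) 2 = 1 := by rw [hm1]; rw [hm] at h; omega
        simp only [obtenerClavesLoop, h, ih, h1]
        simp [pvEvens_cons, pvEvens]

-- ===== VERDICT (by name: the statement is the Claim_ definition above) =====
theorem obtenerClaves_spec : Claim_equal_obtenerClaves := by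
  intro s _
  unfold Spec_obtenerClaves obtenerClaves obtenerClaves_alt
  rw [loop_char]
  simp [PySem.Str.slice?, PySem.Chars.slice?, slice2_evens, slice2_odds, PySem.Int.mod]
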